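-- pv_equiv track=rewrite | github.com/Jhryu30/CodingDiary | 프로그래머스/1/64061. 크레인 인형뽑기 게임/크레인 인형뽑기 게임.py | solution
-- ===== SOURCE A (Python) =====
-- def solution(board, moves):
--     answer = 0
--     N = len(board)
--     board_dict = {col+1:[board[N-row-1][col] for row in range(N)] for col in range(N)}
--     queue = []
--
--     answer = 0
--
--     for move in moves:
--         t = 0
--         while board_dict[move] and not t:
--             t = board_dict[move].pop()
--
--         prev = queue[-1] if queue else 0
--
--         if t and not t==prev:
--             queue.append(t)
--
--         if t and t==prev:
--             answer += 2
--             queue.pop()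
--
--     return answer
-- ===== SOURCE B (Python) =====
-- def solution(board, moves):
--     n = len(board)
--     top = [0] * n          # current top row index per column; board is never modified
--     basket = []
--     answer = 0
--     for m in moves:
--         c = m - 1
--         p = top[c]
--         while p < n and board[p][c] == 0:
--             p += 1
--         if p < n:
--             t = board[p][c]
--             top[c] = p + 1
--         else:
--             t = 0
--             top[c] = p
--         if t:
--             if basket and basket[-1] == t:
--                 basket.pop()
--                 answer += 2
--             else:
--                 basket.append(t)
--     return answer
-- ===== Notes on version B (the rewrite author's own statement) =====
-- stated objective: alternative
-- what changed: Replaces A's upfront O(N^2) dict of reversed column stacks (mutated by repeated pop) with a lazy per-column top-row pointer array that reads the board in place and never copies or mutates it.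
import Mathlib
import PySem

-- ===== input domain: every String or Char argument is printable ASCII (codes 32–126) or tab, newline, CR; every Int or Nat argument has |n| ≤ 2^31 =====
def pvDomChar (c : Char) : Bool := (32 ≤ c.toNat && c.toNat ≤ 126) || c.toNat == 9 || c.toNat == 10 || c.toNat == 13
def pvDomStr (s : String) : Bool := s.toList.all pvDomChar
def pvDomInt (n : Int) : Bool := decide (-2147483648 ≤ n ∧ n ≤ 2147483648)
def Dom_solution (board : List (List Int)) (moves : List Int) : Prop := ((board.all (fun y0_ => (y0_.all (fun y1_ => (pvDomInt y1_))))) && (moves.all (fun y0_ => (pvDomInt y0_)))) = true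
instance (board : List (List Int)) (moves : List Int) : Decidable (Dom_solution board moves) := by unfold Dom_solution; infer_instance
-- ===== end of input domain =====

-- B replaces A's upfront dict of reversed column stacks (mutated by pop) with a lazy
-- per-column top-row pointer array reading the board in place; return values agree on Pre_.

-- ===== PORT A =====
-- the dict-comprehension value for key col+1 (list indexing via getD: exact, Pre_ keeps indices in range)
def colA (board : List (List Int)) (c : Nat) : List Int :=
  (List.range board.length).map (fun row => (board.getD (board.length - row - 1) []).getD c 0)

-- board_dict = {col+1 : colA col for col in range(N)}
def buildDict (board : List (List Int)) : PySem.Dict Int (List Int) :=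
  (List.range board.length).foldl (fun d (c : Nat) => d.insert ((c : Int) + 1) (colA board c)) PySem.Dict.empty

-- t = 0; while board_dict[move] and not t: t = board_dict[move].pop()
def popWhile (xs : List Int) : Int × List Int :=
  if hemp : xs = [] then (0, xs)
  else
    let t := xs.getLast?.getD 0
    let xs' := xs.dropLast
    if t = 0 then popWhile xs' else (t, xs')
termination_by xs.length
decreasing_by have := List.length_pos_of_ne_nil hemp; simp [List.length_dropLast]; omega

-- body of A's for-loop over moves (state: board_dict, queue, answer)
def stepA (st : PySem.Dict Int (List Int) × List Int × Int) (move : Int) :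
    PySem.Dict Int (List Int) × List Int × Int :=
  let (d, queue, answer) := st
  let (t, rest) := popWhile (d.getD move [])
  let d := d.insert move rest
  let prev := queue.getLast?.getD 0
  let queue := if t ≠ 0 ∧ ¬ t = prev then queue ++ [t] else queue
  let (answer, queue) := if t ≠ 0 ∧ t = prev then (answer + 2, queue.dropLast) else (answer, queue)
  (d, queue, answer)

def solution (board : List (List Int)) (moves : List Int) : Int :=
  (moves.foldl stepA (buildDict board, [], 0)).2.2

-- ===== PORT B =====
-- p = top[c]; while p < n and board[p][c] == 0: p += 1
-- row index c via pyGetD/pySetD (Python negative-index wrap; total default only where Python raises);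
-- row lookup board.getD p [] is exact since p < board.length throughout
def scanZ (board : List (List Int)) (c : Int) (n : Nat) (p : Nat) : Nat :=
  if h : p < n ∧ PySem.List.pyGetD (board.getD p []) c 0 = 0 then scanZ board c n (p + 1) else p
termination_by n - p
decreasing_by omega

-- body of B's for-loop over moves (state: top, basket, answer)
def stepB (board : List (List Int)) (st : List Nat × List Int × Int) (m : Int) :
    List Nat × List Int × Int :=
  let (top, basket, answer) := st
  let c : Int := m - 1
  let p := PySem.List.pyGetD top c 0
  let q := scanZ board c board.length p
  let t := if q < board.length then PySem.List.pyGetD (board.getD q []) c 0 else 0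
  let top := PySem.List.pySetD top c (if q < board.length then q + 1 else q)
  let (basket, answer) :=
    if t ≠ 0 then
      if basket ≠ [] ∧ basket.getLast?.getD 0 = t then (basket.dropLast, answer + 2)
      else (basket ++ [t], answer)
    else (basket, answer)
  (top, basket, answer)

def solution_alt (board : List (List Int)) (moves : List Int) : Int :=
  (moves.foldl (stepB board) (List.replicate board.length 0, [], 0)).2.2

-- ===== PRECONDITION & SPEC =====
-- Pre_ = exactly where A returns: every row reaches every column index (else the dict
-- comprehension raises IndexError) and every move is a dict key 1..N (else KeyError).
def Pre_solution (board : List (List Int)) (moves : List Int) : Prop :=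
  (∀ r ∈ board, board.length ≤ r.length) ∧ ∀ m ∈ moves, 1 ≤ m ∧ m ≤ (board.length : Int)
instance (board : List (List Int)) (moves : List Int) : Decidable (Pre_solution board moves) := by
  unfold Pre_solution; infer_instance

def pvWitness_solution : List (List Int) × List Int :=
  ([[0, 0, 0], [1, 0, 2], [3, 2, 2]], [1, 2, 3, 3, 2])

def Spec_solution (board : List (List Int)) (moves : List Int) (out : Int) : Prop := out = solution_alt board moves
instance (board : List (List Int)) (moves : List Int) (out : Int) : Decidable (Spec_solution board moves out) := by unfold Spec_solution; infer_instance

-- ===== CLAIM (what is proved, stated in full; the proofs are below) =====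
def Claim_equal_solution : Prop := ∀ (board : List (List Int)) (moves : List Int), Dom_solution board moves → Pre_solution board moves → Spec_solution board moves (solution board moves)

-- ===== LEMMAS AND PROOFS =====

-- skip zeros, take the first nonzero and the remainder (spec form of both inner loops)
def fnz : List Int → Int × List Int
  | [] => (0, [])
  | x :: xs => if x = 0 then fnz xs else (x, xs)

-- projection of a row onto column c, as Pre_-in-range indexing computes it
def gcol (c : Nat) (r : List Int) : Int := r.getD c 0

theorem popWhile_rev (l : List Int) : popWhile l.reverse = ((fnz l).1, (fnz l).2.reverse) := by
  induction l with
  | nil => rw [popWhile.eq_def]; simp [fnz]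
  | cons x xs ih =>
      rw [show (x :: xs).reverse = xs.reverse ++ [x] by simp, popWhile.eq_def]
      have hne : xs.reverse ++ [x] ≠ [] := by simp
      simp only [hne, dite_false, List.getLast?_concat, Option.getD_some, List.dropLast_concat, fnz]
      split_ifs with hx <;> simp [ih]

-- invariant tying A's dict to B's pointers
def StInv (board : List (List Int)) (d : PySem.Dict Int (List Int)) (top : List Nat) : Prop :=
  top.length = board.length ∧
  ∀ c : Nat, c < board.length →
    top.getD c 0 ≤ board.length ∧
    d.getD ((c : Int) + 1) [] = ((board.map (gcol c)).drop (top.getD c 0)).reverse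

theorem scanZ_fnz (board : List (List Int)) (c : Nat) :
    ∀ fuel p, board.length - p ≤ fuel → p ≤ board.length →
      p ≤ scanZ board (c : Int) board.length p ∧ scanZ board (c : Int) board.length p ≤ board.length ∧
      fnz ((board.drop p).map (gcol c)) =
        ((if scanZ board (c : Int) board.length p < board.length then
            (board.getD (scanZ board (c : Int) board.length p) []).getD c 0 else 0),
         (board.drop (if scanZ board (c : Int) board.length p < board.length then
            scanZ board (c : Int) board.length p + 1 else scanZ board (c : Int) board.length p)).map (gcol c)) := by
  intro fuel
  induction fuel with
  | zero =>
      intro p hf hp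
      have hpn : p = board.length := by omega
      rw [scanZ.eq_def]
      have hc : ¬ (p < board.length ∧ PySem.List.pyGetD (board.getD p []) (c : Int) 0 = 0) := by
        rintro ⟨h, -⟩; omega
      simp [hc, hpn, fnz]
  | succ f ihf =>
      intro p hf hp
      by_cases hc : p < board.length ∧ PySem.List.pyGetD (board.getD p []) (c : Int) 0 = 0
      · rw [scanZ.eq_def]
        simp only [hc, and_self, dite_true]
        have hrec := ihf (p + 1) (by omega) (by omega)
        refine ⟨by omega, hrec.2.1, ?_⟩
        rw [List.drop_eq_getElem_cons hc.1, List.map_cons]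
        have hhead : gcol c board[p] = 0 := by
          have h2 := hc.2
          rw [PySem.List.pyGetD_natCast] at h2
          rw [← List.getD_eq_getElem board [] hc.1]; exact h2
        rw [show fnz (gcol c board[p] :: (board.drop (p + 1)).map (gcol c)) =
            fnz ((board.drop (p + 1)).map (gcol c)) by rw [fnz, if_pos hhead]]
        exact hrec.2.2
      · rw [scanZ.eq_def]
        simp only [hc, dite_false]
        by_cases hpn : p < board.length
        · have hnz : (board.getD p []).getD c 0 ≠ 0 := by
            intro h0
            exact hc ⟨hpn, by rw [PySem.List.pyGetD_natCast]; exact h0⟩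
          refine ⟨le_refl _, by omega, ?_⟩
          rw [List.drop_eq_getElem_cons hpn, List.map_cons]
          have hhead : gcol c board[p] = (board.getD p []).getD c 0 := by
            rw [← List.getD_eq_getElem board [] hpn]; rfl
          rw [show fnz (gcol c board[p] :: (board.drop (p + 1)).map (gcol c)) =
              (gcol c board[p], (board.drop (p + 1)).map (gcol c)) by
            rw [fnz, if_neg (by rw [hhead]; exact hnz)]]
          simp [hpn, hhead]
        · have hpn' : p = board.length := by omega
          simp [hpn, hpn', fnz]

theorem colA_eq (board : List (List Int)) (c : Nat) :
    colA board c = (board.map (gcol c)).reverse := by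
  apply List.ext_getElem
  · simp [colA]
  · intro i h1 h2
    simp only [colA, List.length_map, List.length_range] at h1
    simp only [colA, List.getElem_map, List.getElem_range, List.getElem_reverse,
      List.length_map]
    have hi : board.length - i - 1 < board.length := by omega
    rw [List.getD_eq_getElem board [] hi]
    have he : board.length - 1 - i = board.length - i - 1 := by omega
    simp only [he]
    rfl

theorem foldl_range_getD (F : Nat → List Int) :
    ∀ (k : Nat) (d0 : PySem.Dict Int (List Int)) (m : Int), 1 ≤ m → m ≤ (k : Int) →
      ((List.range k).foldl (fun d (c : Nat) => d.insert ((c : Int) + 1) (F c)) d0).getD m [] =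
        F (m - 1).toNat := by
  intro k
  induction k with
  | zero => intro d0 m h1 h2; omega
  | succ k ih =>
      intro d0 m h1 h2
      rw [List.range_succ, List.foldl_append, List.foldl_cons, List.foldl_nil,
        PySem.Dict.getD_insert]
      by_cases hm : m = (k : Int) + 1
      · rw [if_pos hm]
        have : (m - 1).toNat = k := by omega
        rw [this]
      · rw [if_neg hm]
        exact ih d0 m h1 (by omega)

theorem buildDict_getD (board : List (List Int)) (m : Int) (h1 : 1 ≤ m)
    (h2 : m ≤ (board.length : Int)) :
    (buildDict board).getD m [] = colA board (m - 1).toNat := by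
  exact foldl_range_getD (colA board) board.length PySem.Dict.empty m h1 h2

theorem step_eq (board : List (List Int)) (d : PySem.Dict Int (List Int)) (top : List Nat)
    (q : List Int) (a : Int) (m : Int) (hStInv : StInv board d top)
    (hm1 : 1 ≤ m) (hm2 : m ≤ (board.length : Int)) :
    StInv board (stepA (d, q, a) m).1 (stepB board (top, q, a) m).1 ∧
    (stepA (d, q, a) m).2 = (stepB board (top, q, a) m).2 := by
  have hlen := hStInv.1
  set c := (m - 1).toNat with hcdef
  have hcN : c < board.length := by omega
  obtain ⟨hk, hd⟩ := hStInv.2 c hcN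
  set k := top.getD c 0 with hkdef
  have hkey : ((c : Int) + 1) = m := by omega
  have hdm : d.getD m [] = ((board.drop k).map (gcol c)).reverse := by
    rw [← hkey, hd, ← List.map_drop]
  have hs := scanZ_fnz board c board.length k (by omega) hk
  set q' := scanZ board (c : Int) board.length k with hq'def
  have hpop : popWhile (d.getD m []) =
      ((if q' < board.length then (board.getD q' []).getD c 0 else 0),
       ((board.drop (if q' < board.length then q' + 1 else q')).map (gcol c)).reverse) := by
    rw [hdm, popWhile_rev, hs.2.2]
  have hcast : m - 1 = ((c : Nat) : Int) := by omega
  simp only [stepA, stepB, hcast, PySem.List.pyGetD_natCast, PySem.List.pySetD_natCast,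
    ← hkdef, ← hq'def, hpop]
  constructor
  · refine ⟨by simp [hlen], fun c' hc' => ?_⟩
    by_cases hcc : c' = c
    · subst hcc
      have hct : c < top.length := by omega
      have hset : (top.set c (if q' < board.length then q' + 1 else q')).getD c 0 =
          (if q' < board.length then q' + 1 else q') := by
        simp [List.getD, hct]
      refine ⟨?_, ?_⟩
      · rw [hset]; have := hs.2.1; split <;> omega
      · rw [hset, hkey, PySem.Dict.getD_insert, if_pos rfl, ← List.map_drop]
    · have hset : (top.set c (if q' < board.length then q' + 1 else q')).getD c' 0 =
          top.getD c' 0 := by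
        simp [List.getD, List.getElem?_set_ne (fun h => hcc h.symm)]
      have hkne : ¬ ((c' : Int) + 1) = m := by omega
      rw [hset, PySem.Dict.getD_insert, if_neg hkne]
      exact hStInv.2 c' hc'
  · set t := (if q' < board.length then (board.getD q' []).getD c 0 else 0) with htdef
    by_cases ht : t = 0
    · simp [ht]
    · by_cases hpe : t = q.getLast?.getD 0
      · have hq0 : q ≠ [] := by
          intro h; rw [h] at hpe; simp at hpe; exact ht hpe
        have hcond1 : t ≠ 0 ∧ t = q.getLast?.getD 0 := ⟨ht, hpe⟩
        have hcond2 : ¬ (t ≠ 0 ∧ ¬ t = q.getLast?.getD 0) := by simp [hpe]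
        simp only [if_pos hcond1, if_neg hcond2, if_pos (show t ≠ 0 from ht),
          if_pos (show q ≠ [] ∧ q.getLast?.getD 0 = t from ⟨hq0, hpe.symm⟩)]
      · have hcond1 : ¬ (t ≠ 0 ∧ t = q.getLast?.getD 0) := by simp [hpe, ht]
        have hcond2 : t ≠ 0 ∧ ¬ t = q.getLast?.getD 0 := ⟨ht, hpe⟩
        have hBc : ¬ (q ≠ [] ∧ q.getLast?.getD 0 = t) := by
          rintro ⟨h1, h2⟩; exact hpe h2.symm
        simp only [if_neg hcond1, if_pos hcond2, if_pos (show t ≠ 0 from ht), if_neg hBc]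

theorem foldl_eq (board : List (List Int)) (moves : List Int) :
    ∀ d top q a, StInv board d top → (∀ m ∈ moves, 1 ≤ m ∧ m ≤ (board.length : Int)) →
      (moves.foldl stepA (d, q, a)).2 = (moves.foldl (stepB board) (top, q, a)).2 := by
  induction moves with
  | nil => intro d top q a _ _; rfl
  | cons m ms ih =>
      intro d top q a hStInv hmoves
      have hm := hmoves m (List.mem_cons_self)
      have hstep := step_eq board d top q a m hStInv hm.1 hm.2
      rcases hA : stepA (d, q, a) m with ⟨dA, qA, aA⟩
      rcases hB : stepB board (top, q, a) m with ⟨dB, qB, aB⟩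
      rw [hA, hB] at hstep
      obtain ⟨hq, ha⟩ : qA = qB ∧ aA = aB := by simpa [Prod.ext_iff] using hstep.2
      subst hq; subst ha
      simp only [List.foldl_cons, hA, hB]
      exact ih dA dB qA aA hstep.1 (fun x hx => hmoves x (List.mem_cons_of_mem _ hx))

theorem StInv_init (board : List (List Int)) :
    StInv board (buildDict board) (List.replicate board.length 0) := by
  refine ⟨by simp, fun c hc => ?_⟩
  have hget : (List.replicate board.length (0 : Nat)).getD c 0 = 0 := by
    simp [List.getD, hc]
  refine ⟨by omega, ?_⟩
  rw [hget]
  have h1 : (1 : Int) ≤ (c : Int) + 1 := by omega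
  have h2 : ((c : Int) + 1) ≤ (board.length : Int) := by omega
  rw [buildDict_getD board ((c : Int) + 1) h1 h2]
  have : ((c : Int) + 1 - 1).toNat = c := by omega
  rw [this, colA_eq]
  simp

-- ===== VERDICT (by name: the statement is the Claim_ definition above) =====
theorem solution_spec : Claim_equal_solution := by
  intro board moves _ hpre
  unfold Spec_solution solution solution_alt
  have := foldl_eq board moves (buildDict board) (List.replicate board.length 0) [] 0
    (StInv_init board) hpre.2
  rw [this]
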